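-- pv_equiv track=rewrite | github.com/Prompthon-IO/agent-systems-handbook | skills/prompt-cache-agent-harness/scripts/prompt_cache_report.py | optional_field_status
-- ===== SOURCE A (Python) =====
-- from typing import Any, Iterable
--
-- def optional_field_status(values: Iterable[str | None]) -> str:
--     collected = list(values)
--     present = [value for value in collected if value is not None]
--     if not present:
--         return "missing"
--     if len(present) != len(collected):
--         return "partial"
--     if len(set(present)) == 1:
--         return "same"
--     return "changed"
-- ===== SOURCE B (Python) =====
-- def _merge(a, b):
--     n1, p1 = a
--     n2, p2 = b
--     if p1[0] == "empty":
--         p = p2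
--     elif p2[0] == "empty":
--         p = p1
--     elif p1[0] == "var" or p2[0] == "var":
--         p = ("var",)
--     elif p1[1] == p2[1]:
--         p = p1
--     else:
--         p = ("var",)
--     return (n1 or n2, p)
--
--
-- def _summarize(vals, lo, hi):
--     if hi - lo == 1:
--         v = vals[lo]
--         return (True, ("empty",)) if v is None else (False, ("uni", v))
--     mid = (lo + hi) // 2
--     return _merge(_summarize(vals, lo, mid), _summarize(vals, mid, hi))
--
--
-- def optional_field_status(values):
--     vals = list(values)
--     if not vals:
--         return "missing"
--     has_none, pres = _summarize(vals, 0, len(vals))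
--     if pres[0] == "empty":
--         return "missing"
--     if has_none:
--         return "partial"
--     if pres[0] == "uni":
--         return "same"
--     return "changed"
-- ===== Notes on version B (the rewrite author's own statement) =====
-- stated objective: alternative
-- what changed: Replaced the staged list/set passes by a divide-and-conquer reduction: the list is split recursively in half and each half is summarized into a tiny associative monoid value (has-None flag plus empty/uniform(v)/varied present-summary) merged bottom-up, then classified once.
import Mathlib
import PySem

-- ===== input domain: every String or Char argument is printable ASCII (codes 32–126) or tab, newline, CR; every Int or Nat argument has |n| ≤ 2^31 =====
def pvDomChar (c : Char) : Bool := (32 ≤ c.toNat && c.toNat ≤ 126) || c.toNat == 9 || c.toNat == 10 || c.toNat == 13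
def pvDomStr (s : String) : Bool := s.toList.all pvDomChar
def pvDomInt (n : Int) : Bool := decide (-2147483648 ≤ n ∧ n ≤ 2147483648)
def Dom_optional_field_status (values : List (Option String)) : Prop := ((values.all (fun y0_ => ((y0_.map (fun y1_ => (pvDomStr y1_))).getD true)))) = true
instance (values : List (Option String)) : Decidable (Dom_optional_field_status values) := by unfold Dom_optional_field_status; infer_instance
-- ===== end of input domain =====

-- B replaces A's staged list/set passes by a divide-and-conquer reduction over an
-- associative summary monoid (has-None flag × empty/uniform(v)/varied), merged bottom-up
-- and classified once (objective: alternative).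

-- ===== PORT A =====
def optional_field_status (values : List (Option String)) : String :=
  let collected := values
  let present := collected.filterMap id
  if present = [] then "missing"
  else if present.length ≠ collected.length then "partial"
  else if PySem.Set.len (PySem.Set.ofList present) = 1 then "same"
  else "changed"

-- ===== PORT B =====
inductive PresSum
  | empty : PresSum
  | uni : String → PresSum
  | var : PresSum
deriving DecidableEq, Repr

def pvMerge (a b : Bool × PresSum) : Bool × PresSum :=
  match a, b with
  | (n1, p1), (n2, p2) =>
    let p :=
      match p1, p2 with
      | .empty, p => p
      | p, .empty => p
      | .var, _ => PresSum.var
      | _, .var => PresSum.var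
      | .uni x, .uni y => if x = y then PresSum.uni x else PresSum.var
    (n1 || n2, p)

-- halving recursion of Source B's _summarize (lo/hi indices rendered as take/drop)
def pvSummarize (vs : List (Option String)) : Bool × PresSum :=
  if h : vs.length ≤ 1 then
    match vs with
    | [] => (false, .empty)
    | none :: _ => (true, .empty)
    | some v :: _ => (false, .uni v)
  else
    pvMerge (pvSummarize (vs.take (vs.length / 2))) (pvSummarize (vs.drop (vs.length / 2)))
termination_by vs.length
decreasing_by
  · simp only [List.length_take]; omega
  · simp only [List.length_drop]; omega

def optional_field_status_alt (values : List (Option String)) : String :=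
  if values = [] then "missing"
  else
    match pvSummarize values with
    | (has_none, pres) =>
      match pres with
      | .empty => "missing"
      | .uni _ => if has_none then "partial" else "same"
      | .var => if has_none then "partial" else "changed"

-- ===== PRECONDITION & SPEC =====
def Spec_optional_field_status (values : List (Option String)) (out : String) : Prop := out = optional_field_status_alt values
instance (values : List (Option String)) (out : String) : Decidable (Spec_optional_field_status values out) := by unfold Spec_optional_field_status; infer_instance

-- ===== CLAIM (what is proved, stated in full; the proofs are below) =====
def Claim_equal_optional_field_status : Prop := ∀ (values : List (Option String)), Dom_optional_field_status values → Spec_optional_field_status values (optional_field_status values)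

-- ===== LEMMAS AND PROOFS =====

def pvPresOf : List String → PresSum
  | [] => .empty
  | g :: rest => if rest.all (· == g) then .uni g else .var

lemma pvPresOf_append (l1 l2 : List String) :
    pvPresOf (l1 ++ l2) =
      (match pvPresOf l1, pvPresOf l2 with
       | .empty, p => p
       | p, .empty => p
       | .var, _ => PresSum.var
       | _, .var => PresSum.var
       | .uni x, .uni y => if x = y then PresSum.uni x else PresSum.var) := by
  cases l1 with
  | nil => simp [pvPresOf]
  | cons g1 r1 =>
    cases l2 with
    | nil =>
      simp only [pvPresOf, List.append_nil, List.all_eq_true, beq_iff_eq]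
      by_cases h1 : ∀ x ∈ r1, x = g1
      · rw [if_pos h1]
      · rw [if_neg h1]
    | cons g2 r2 =>
      simp only [pvPresOf, List.cons_append, List.all_append, List.all_cons,
        Bool.and_eq_true, List.all_eq_true, beq_iff_eq]
      by_cases h1 : ∀ x ∈ r1, x = g1
      · by_cases h2 : ∀ x ∈ r2, x = g2
        · by_cases hg : g1 = g2
          · subst hg
            rw [if_pos h1, if_pos h2, if_pos ⟨h1, rfl, h2⟩]
            simp
          · have hg' : ¬ (g2 = g1) := fun h => hg h.symm
            rw [if_pos h1, if_pos h2,
              if_neg (show ¬ ((∀ x ∈ r1, x = g1) ∧ g2 = g1 ∧ ∀ x ∈ r2, x = g1) from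
                fun hc => hg' hc.2.1)]
            simp [hg]
        · have hfalse : ¬ ((∀ x ∈ r1, x = g1) ∧ g2 = g1 ∧ ∀ x ∈ r2, x = g1) := by
            rintro ⟨-, hgg, h⟩
            exact h2 (fun x hx => hgg ▸ h x hx)
          rw [if_pos h1, if_neg h2, if_neg hfalse]
      · rw [if_neg h1,
          if_neg (show ¬ ((∀ x ∈ r1, x = g1) ∧ g2 = g1 ∧ ∀ x ∈ r2, x = g1) from
            fun hc => h1 hc.1)]
        by_cases h2 : ∀ x ∈ r2, x = g2
        · rw [if_pos h2]
        · rw [if_neg h2]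

lemma pvSummarize_char (n : Nat) : ∀ vs : List (Option String), vs.length ≤ n → vs ≠ [] →
    pvSummarize vs = (vs.any (fun v => v.isNone), pvPresOf (vs.filterMap id)) := by
  induction n with
  | zero =>
    intro vs h hne
    cases vs with
    | nil => exact absurd rfl hne
    | cons a t => simp at h
  | succ n ih =>
    intro vs hlen hne
    by_cases h : vs.length ≤ 1
    · rw [pvSummarize, dif_pos h]
      obtain ⟨x, rfl⟩ : ∃ x, vs = [x] := by
        cases vs with
        | nil => exact absurd rfl hne
        | cons a t =>
          cases t with
          | nil => exact ⟨a, rfl⟩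
          | cons b t' => simp at h
      cases x <;> simp [pvPresOf]
    · rw [pvSummarize, dif_neg h]
      have htne : vs.take (vs.length / 2) ≠ [] := by
        intro hc
        have hlc := congrArg List.length hc
        simp only [List.length_take, List.length_nil] at hlc
        omega
      have hdne : vs.drop (vs.length / 2) ≠ [] := by
        intro hc
        have hlc := congrArg List.length hc
        simp only [List.length_drop, List.length_nil] at hlc
        omega
      rw [ih (vs.take (vs.length / 2)) (le_trans (List.length_take_le _ _) (by omega)) htne,
          ih (vs.drop (vs.length / 2)) (by simp only [List.length_drop]; omega) hdne]
      have hsplit : vs.take (vs.length / 2) ++ vs.drop (vs.length / 2) = vs :=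
        List.take_append_drop _ _
      unfold pvMerge
      refine Prod.ext ?_ ?_
      · simp only
        rw [← List.any_append, hsplit]
      · simp only
        conv_rhs => rw [← hsplit]
        rw [List.filterMap_append, pvPresOf_append]

lemma pvLen_any (values : List (Option String)) :
    ((values.filterMap id).length = values.length) ↔ values.any (fun v => v.isNone) = false := by
  induction values with
  | nil => simp
  | cons v t ih =>
    cases v with
    | none =>
      have hle := List.length_filterMap_le (fun x : Option String => x) t
      simp only [List.filterMap_cons, id_eq, List.length_cons, List.any_cons, Option.isNone_none,
        Bool.true_or]
      constructor
      · intro hlen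
        omega
      · intro hfalse
        exact absurd hfalse (by simp)
    | some x =>
      simp only [List.filterMap_cons, id_eq, List.length_cons, List.any_cons,
        Option.isNone_some, Bool.false_or, Nat.add_right_cancel_iff]
      exact ih

lemma pvSetLen_one (g : String) (rest : List String) :
    (PySem.Set.ofList (g :: rest)).length = 1 ↔ ∀ y ∈ rest, y = g := by
  rw [PySem.Set.ofList_cons]
  constructor
  · intro h y hy
    by_contra hne
    have hd : PySem.Set.discard (PySem.Set.ofList rest) g = [] := by
      rw [List.length_cons] at h
      exact List.eq_nil_of_length_eq_zero (by omega)
    have hmem : y ∈ PySem.Set.discard (PySem.Set.ofList rest) g := by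
      rw [PySem.Set.mem_discard]
      exact ⟨(PySem.Set.mem_ofList _ _).2 hy, hne⟩
    simp [hd] at hmem
  · intro h
    have hd : PySem.Set.discard (PySem.Set.ofList rest) g = [] := by
      rw [List.eq_nil_iff_forall_not_mem]
      intro y hy
      rw [PySem.Set.mem_discard, PySem.Set.mem_ofList _ _] at hy
      exact hy.2 (h y hy.1)
    simp [hd]

-- ===== VERDICT (by name: the statement is the Claim_ definition above) =====
theorem optional_field_status_spec : Claim_equal_optional_field_status := by
  intro values _
  unfold Spec_optional_field_status optional_field_status optional_field_status_alt
  by_cases hv : values = []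
  · subst hv; simp
  · rw [if_neg hv, pvSummarize_char values.length values le_rfl hv]
    cases hps : values.filterMap id with
    | nil =>
      simp only [hps, pvPresOf]
      rfl
    | cons g rest =>
      simp only [hps, pvPresOf, List.length_cons]
      have hlenany := pvLen_any values
      rw [hps] at hlenany
      rw [if_neg (show ¬ (g :: rest = []) by simp)]
      by_cases hall : rest.all (· == g)
      · rw [if_pos hall]
        by_cases hany : values.any (fun v => v.isNone) = false
        · have hlen : rest.length + 1 = values.length := by
            have := hlenany.2 hany; simpa using this
          rw [if_neg (by simpa [List.length_cons] using hlen), hany]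
          have h1 : (PySem.Set.ofList (g :: rest)).length = 1 :=
            (pvSetLen_one g rest).2 (by simpa [List.all_eq_true] using hall)
          simp [PySem.Set.len, h1]
        · have hany' : values.any (fun v => v.isNone) = true := by
            cases hb : values.any (fun v => v.isNone)
            · exact absurd hb hany
            · rfl
          have hlen : rest.length + 1 ≠ values.length := by
            intro hc
            exact hany ((hlenany.1 (by simpa using hc)))
          rw [if_pos (by simpa [List.length_cons] using hlen), hany']
          rfl
      · rw [if_neg hall]
        by_cases hany : values.any (fun v => v.isNone) = false
        · have hlen : rest.length + 1 = values.length := by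
            have := hlenany.2 hany; simpa using this
          rw [if_neg (by simpa [List.length_cons] using hlen), hany]
          have h1 : ¬ (PySem.Set.ofList (g :: rest)).length = 1 := by
            intro h
            exact hall (by simpa [List.all_eq_true] using (pvSetLen_one g rest).1 h)
          simp [PySem.Set.len, h1]
        · have hany' : values.any (fun v => v.isNone) = true := by
            cases hb : values.any (fun v => v.isNone)
            · exact absurd hb hany
            · rfl
          have hlen : rest.length + 1 ≠ values.length := by
            intro hc
            exact hany ((hlenany.1 (by simpa using hc)))
          rw [if_pos (by simpa [List.length_cons] using hlen), hany']
          rfl
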